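-- pv_equiv track=rewrite | github.com/ioanmh21/decodeqr | decode.py | debordare
-- ===== SOURCE A (Python) =====
-- def debordare(mat):
--     def debord1(amat):
--         amat.pop(0)
--         amat.pop(-1)
--         bmat=[]
--         for line in amat:
--             line.pop(0)
--             line.pop(-1)
--             bmat.append(line)
--         return bmat
--     while mat[0][0]==0:
--         mat=debord1(mat)
--     return mat
-- ===== SOURCE B (Python) =====
-- def debordare(mat):
--     # Scan the main diagonal for the first nonzero entry, then slice the
--     # submatrix out in one pass (no repeated pops; does not mutate mat).
--     k = 0
--     while mat[k][k] == 0: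
--         k += 1
--     return [row[k:len(row)-k] for row in mat[k:len(mat)-k]]
-- ===== Notes on version B (the rewrite author's own statement) =====
-- stated objective: alternative
-- what changed: Instead of repeatedly stripping one border layer at a time with pops (rebuilding the matrix once per layer), B scans the main diagonal once to find the number k of zero layers and slices the central submatrix out in a single pass; B also does not mutate its argument.
import Mathlib
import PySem

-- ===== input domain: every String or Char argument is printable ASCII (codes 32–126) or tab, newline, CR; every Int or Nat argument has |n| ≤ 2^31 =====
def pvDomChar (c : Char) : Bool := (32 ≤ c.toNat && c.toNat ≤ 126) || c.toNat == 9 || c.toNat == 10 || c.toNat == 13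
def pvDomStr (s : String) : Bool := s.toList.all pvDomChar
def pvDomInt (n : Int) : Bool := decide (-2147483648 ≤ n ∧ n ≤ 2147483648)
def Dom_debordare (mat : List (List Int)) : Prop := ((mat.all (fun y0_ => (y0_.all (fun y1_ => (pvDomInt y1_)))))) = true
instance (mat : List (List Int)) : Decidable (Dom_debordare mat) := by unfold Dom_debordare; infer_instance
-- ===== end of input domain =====

-- B strips all concentric zero border layers at once (diagonal scan + one slice) instead of
-- peeling one layer per pass with pops; equivalence is about the RETURN value only
-- (Python A mutates its argument in place, B does not).

-- ===== PORT A =====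
-- 'for line in amat: line.pop(0); line.pop(-1); bmat.append(line)' — none = some pop raised
def stripLinesA (lines : List (List Int)) : Option (List (List Int)) :=
  match lines with
  | [] => some []
  | line :: rest =>
    match PySem.List.pop? line 0 with
    | none => none
    | some (_, l1) =>
      match PySem.List.pop? l1 (-1) with
      | none => none
      | some (_, l2) =>
        match stripLinesA rest with
        | none => none
        | some bs => some (l2 :: bs)

-- the inner helper debord1; none = an IndexError inside it
def debord1A (amat : List (List Int)) : Option (List (List Int)) :=
  match PySem.List.pop? amat 0 with
  | none => none
  | some (_, a1) =>
    match PySem.List.pop? a1 (-1) with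
    | none => none
    | some (_, a2) => stripLinesA a2

-- 'while mat[0][0]==0: mat = debord1(mat)'; fuel only makes the loop total (each
-- successful pass shortens mat by 2, so mat.length + 1 passes never run out on a
-- terminating run); on a raising path the returned value is irrelevant (outside Pre_).
def debordareGo : Nat → List (List Int) → List (List Int)
  | 0, mat => mat
  | fuel+1, mat =>
    match PySem.List.pyGet? mat 0 with
    | none => mat
    | some row =>
      match PySem.List.pyGet? row 0 with
      | none => mat
      | some v =>
        if v = 0 then
          match debord1A mat with
          | none => mat
          | some m' => debordareGo fuel m'
        else mat

def debordare (mat : List (List Int)) : List (List Int) :=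
  debordareGo (mat.length + 1) mat

-- ===== PORT B =====
-- 'k = 0; while mat[k][k] == 0: k += 1' (fuel for totality only; a raise returns junk, outside Pre_)
def findKB : Nat → Nat → List (List Int) → Nat
  | 0, k, _ => k
  | fuel+1, k, mat =>
    match PySem.List.pyGet? mat (k : Int) with
    | none => k
    | some row =>
      match PySem.List.pyGet? row (k : Int) with
      | none => k
      | some v => if v = 0 then findKB fuel (k+1) mat else k

-- 'return [row[k:len(row)-k] for row in mat[k:len(mat)-k]]'
def debordare_alt (mat : List (List Int)) : List (List Int) :=
  let k := findKB (mat.length + 1) 0 mat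
  (PySem.List.slice mat (some (k : Int)) (some ((mat.length : Int) - (k : Int)))).map
    (fun row => PySem.List.slice row (some (k : Int)) (some ((row.length : Int) - (k : Int))))

-- ===== PRECONDITION & SPEC =====
-- PreAt mat k: the while loop of A runs exactly k times and returns normally —
-- the first k diagonal entries exist and are 0, entry (k,k) exists and is nonzero,
-- and every row touched while stripping layer i is long enough for both pops.
def PreAt (mat : List (List Int)) (k : Nat) : Prop :=
  2*k < mat.length ∧
  2*k < (mat.getD k []).length ∧
  (mat.getD k []).getD k 0 ≠ 0 ∧
  (∀ i < k, 2*i < (mat.getD i []).length ∧ (mat.getD i []).getD i 0 = 0) ∧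
  (∀ i < k, ∀ j < mat.length, i+1 ≤ j → j+2+i ≤ mat.length → 2*i+2 ≤ (mat.getD j []).length)

-- Pre_ = exactly the inputs on which Python A returns (otherwise some pop/index raises IndexError)
def Pre_debordare (mat : List (List Int)) : Prop := ∃ k < mat.length, PreAt mat k
instance (mat : List (List Int)) : Decidable (Pre_debordare mat) := by
  unfold Pre_debordare PreAt; infer_instance

def pvWitness_debordare : List (List Int) := [[0,0,0],[0,7,0],[0,0,0]]

def Spec_debordare (mat : List (List Int)) (out : List (List Int)) : Prop := out = debordare_alt mat
instance (mat : List (List Int)) (out : List (List Int)) : Decidable (Spec_debordare mat out) := by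
  unfold Spec_debordare; infer_instance

-- ===== CLAIM (what is proved, stated in full; the proofs are below) =====
def Claim_equal_debordare : Prop :=
  ∀ (mat : List (List Int)), Dom_debordare mat → Pre_debordare mat → Spec_debordare mat (debordare mat)

-- ===== LEMMAS AND PROOFS =====

-- the common pure value both ports compute: drop k border layers at once
def T (mat : List (List Int)) (k : Nat) : List (List Int) :=
  ((mat.drop k).take (mat.length - 2*k)).map (fun r => (r.drop k).take (r.length - 2*k))

theorem tdl_eq {a : Type} (l : List a) : l.tail.dropLast = (l.drop 1).take (l.length - 2) := by
  rw [← List.drop_one, List.dropLast_eq_take, List.length_drop]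
  congr 1

theorem tdl_length {a : Type} (l : List a) : l.tail.dropLast.length = l.length - 2 := by
  rw [List.length_dropLast, List.length_tail]
  omega

theorem tdl_getD (r : List Int) (i : Nat) (h : i + 2 < r.length) :
    (r.tail.dropLast).getD i 0 = r.getD (i+1) 0 := by
  rw [tdl_eq, List.getD_eq_getElem?_getD, List.getD_eq_getElem?_getD,
      List.getElem?_take_of_lt (by omega), List.getElem?_drop, Nat.add_comm 1 i]

theorem tdl_getD_outer (mat : List (List Int)) (i : Nat) (h : i < mat.length - 2) :
    (mat.tail.dropLast).getD i [] = mat.getD (i+1) [] := by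
  rw [tdl_eq, List.getD_eq_getElem?_getD, List.getD_eq_getElem?_getD,
      List.getElem?_take_of_lt (by omega), List.getElem?_drop, Nat.add_comm 1 i]

theorem stripM_getD (mat : List (List Int)) (i : Nat) (h : i < mat.length - 2) :
    ((mat.tail.dropLast).map (fun r => r.tail.dropLast)).getD i []
      = (mat.getD (i+1) []).tail.dropLast := by
  rw [List.getD_eq_getElem?_getD, List.getElem?_map, tdl_eq mat,
      List.getElem?_take_of_lt (by omega), List.getElem?_drop, Nat.add_comm 1 i,
      List.getD_eq_getElem?_getD]
  cases mat[i+1]? <;> simp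

theorem pyGet?_getD {a : Type} (xs : List a) (j : Nat) (d : a) (h : j < xs.length) :
    PySem.List.pyGet? xs (j : Int) = some (xs.getD j d) := by
  rw [PySem.List.pyGet?_natCast, List.getD_eq_getElem _ _ h, List.getElem?_eq_getElem h]

theorem stripLinesA_eq (lines : List (List Int)) (h : ∀ l ∈ lines, 2 ≤ l.length) :
    stripLinesA lines = some (lines.map (fun r => r.tail.dropLast)) := by
  induction lines with
  | nil => rfl
  | cons line rest ih =>
    have hl : 2 ≤ line.length := h line (by simp)
    obtain ⟨x, l, rfl⟩ : ∃ x l, line = x :: l := by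
      cases line with
      | nil => simp at hl
      | cons x l => exact ⟨x, l, rfl⟩
    have hne : l ≠ [] := by
      cases l with
      | nil => simp at hl
      | cons y t => simp
    have hpop : PySem.List.pop? l (-1) = some (l.getLast hne, l.dropLast) := by
      conv_lhs => rw [← List.dropLast_append_getLast hne]
      exact PySem.List.pop?_last _ _
    simp [stripLinesA, PySem.List.pop?_zero_cons, hpop,
          ih (fun l' hl' => h l' (by simp [hl']))]

theorem debord1A_eq (mat : List (List Int)) (h2 : 2 ≤ mat.length)
    (h : ∀ l ∈ mat.tail.dropLast, 2 ≤ l.length) :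
    debord1A mat = some ((mat.tail.dropLast).map (fun r => r.tail.dropLast)) := by
  obtain ⟨a, rest, rfl⟩ : ∃ a r, mat = a :: r := by
    cases mat with
    | nil => simp at h2
    | cons a r => exact ⟨a, r, rfl⟩
  have hne : rest ≠ [] := by
    cases rest with
    | nil => simp at h2
    | cons y t => simp
  have hpop : PySem.List.pop? rest (-1) = some (rest.getLast hne, rest.dropLast) := by
    conv_lhs => rw [← List.dropLast_append_getLast hne]
    exact PySem.List.pop?_last _ _
  have hs := stripLinesA_eq rest.dropLast (by simpa using h)
  simp [debord1A, PySem.List.pop?_zero_cons, hpop, hs]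

theorem fk_strip1 (r : List Int) (k : Nat) :
    ((r.tail.dropLast).drop k).take ((r.tail.dropLast).length - 2*k)
      = (r.drop (k+1)).take (r.length - 2*(k+1)) := by
  rw [tdl_length, tdl_eq, List.drop_take, List.drop_drop, List.take_take, Nat.add_comm 1 k]
  congr 1
  omega

theorem T_succ (mat : List (List Int)) (k : Nat) :
    T ((mat.tail.dropLast).map (fun r => r.tail.dropLast)) k = T mat (k+1) := by
  unfold T
  rw [List.length_map, tdl_length, ← List.map_drop, ← List.map_take, List.map_map]
  have hrows : ((mat.tail.dropLast).drop k).take (mat.length - 2 - 2*k)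
      = (mat.drop (k+1)).take (mat.length - 2*(k+1)) := by
    rw [tdl_eq, List.drop_take, List.drop_drop, List.take_take, Nat.add_comm 1 k]
    congr 1
    omega
  rw [hrows]
  apply List.map_congr_left
  intro r _
  exact fk_strip1 r k

theorem PreAt_strip (mat : List (List Int)) (k : Nat) (h : PreAt mat (k+1)) :
    PreAt ((mat.tail.dropLast).map (fun r => r.tail.dropLast)) k := by
  obtain ⟨h1, h2, h3, h4, h5⟩ := h
  refine ⟨?_, ?_, ?_, ?_, ?_⟩
  · rw [List.length_map, tdl_length]
    omega
  · rw [stripM_getD _ _ (by omega), tdl_length]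
    omega
  · rw [stripM_getD _ _ (by omega), tdl_getD _ _ (by omega)]
    exact h3
  · intro i hi
    have h4' := h4 (i+1) (by omega)
    refine ⟨?_, ?_⟩
    · rw [stripM_getD _ _ (by omega), tdl_length]
      omega
    · rw [stripM_getD _ _ (by omega), tdl_getD _ _ (by omega)]
      exact h4'.2
  · intro i hi j hj hij hb
    rw [List.length_map, tdl_length] at hj hb
    rw [stripM_getD _ _ (by omega), tdl_length]
    have h5' := h5 (i+1) (by omega) (j+1) (by omega) (by omega) (by omega)
    omega

theorem goA_eq (k : Nat) : ∀ (mat : List (List Int)) (fuel : Nat), PreAt mat k → k < fuel →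
    debordareGo fuel mat = T mat k := by
  induction k with
  | zero =>
    intro mat fuel h hf
    obtain ⟨h1, h2, h3, _, _⟩ := h
    obtain ⟨f, rfl⟩ : ∃ f, fuel = f + 1 := ⟨fuel - 1, by omega⟩
    obtain ⟨r0, rest, rfl⟩ : ∃ r0 rest, mat = r0 :: rest := by
      cases mat with
      | nil => simp at h1
      | cons a b => exact ⟨a, b, rfl⟩
    simp only [List.getD_cons_zero] at h2 h3
    obtain ⟨v, t, rfl⟩ : ∃ v t, r0 = v :: t := by
      cases r0 with
      | nil => simp at h2
      | cons a b => exact ⟨a, b, rfl⟩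
    simp only [List.getD_cons_zero] at h3
    simp [debordareGo, h3, T, List.take_length]
  | succ k ih =>
    intro mat fuel h hf
    have hs := PreAt_strip mat k h
    obtain ⟨h1, h2, h3, h4, h5⟩ := h
    obtain ⟨f, rfl⟩ : ∃ f, fuel = f + 1 := ⟨fuel - 1, by omega⟩
    have hrows : ∀ l ∈ mat.tail.dropLast, 2 ≤ l.length := by
      intro l hl
      obtain ⟨i, hi, hgi⟩ := List.mem_iff_getElem.1 hl
      have hlen : i < mat.length - 2 := by
        rw [tdl_length] at hi
        omega
      have hl' : mat.getD (i+1) [] = l := by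
        rw [← tdl_getD_outer mat i hlen, List.getD_eq_getElem _ _ hi, hgi]
      have h5' := h5 0 (by omega) (i+1) (by omega) (by omega) (by omega)
      rw [hl'] at h5'
      omega
    have hd1 := debord1A_eq mat (by omega) hrows
    obtain ⟨r0, rest, rfl⟩ : ∃ r0 rest, mat = r0 :: rest := by
      cases mat with
      | nil => simp at h1
      | cons a b => exact ⟨a, b, rfl⟩
    have h40 := h4 0 (by omega)
    simp only [List.getD_cons_zero] at h40
    obtain ⟨v, t, rfl⟩ : ∃ v t, r0 = v :: t := by
      cases r0 with
      | nil => exact absurd h40.1 (by simp)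
      | cons a b => exact ⟨a, b, rfl⟩
    simp only [List.getD_cons_zero] at h40
    obtain ⟨hlen0, rfl⟩ := h40
    rw [show debordareGo (f+1) ((0 :: t) :: rest)
          = debordareGo f (((0 :: t) :: rest).tail.dropLast.map (fun r => r.tail.dropLast)) from by
        simp [debordareGo, hd1]]
    rw [ih _ f hs (by omega), T_succ]

theorem findKB_step (f j : Nat) (mat : List (List Int)) (row : List Int) (v : Int)
    (h1 : PySem.List.pyGet? mat (j : Int) = some row)
    (h2 : PySem.List.pyGet? row (j : Int) = some v) :
    findKB (f+1) j mat = if v = 0 then findKB f (j+1) mat else j := by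
  simp only [findKB, h1, h2]

theorem findKB_eq (mat : List (List Int)) (k : Nat) (h : PreAt mat k) :
    ∀ (fuel j : Nat), j ≤ k → k < j + fuel → findKB fuel j mat = k := by
  obtain ⟨h1, h2, h3, h4, h5⟩ := h
  intro fuel
  induction fuel with
  | zero =>
    intro j hj hf
    omega
  | succ f ih =>
    intro j hj hf
    rcases Nat.lt_or_ge j k with hjk | hjk
    · have h4j := h4 j hjk
      rw [findKB_step f j mat _ _ (pyGet?_getD mat j [] (by omega))
            (pyGet?_getD (mat.getD j []) j 0 (by omega)), h4j.2, if_pos rfl]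
      exact ih (j+1) (by omega) (by omega)
    · have hje : j = k := by omega
      subst hje
      rw [findKB_step f j mat _ _ (pyGet?_getD mat j [] (by omega))
            (pyGet?_getD (mat.getD j []) j 0 (by omega)), if_neg h3]

theorem altB_eq (mat : List (List Int)) (k : Nat) (h : PreAt mat k) :
    debordare_alt mat = T mat k := by
  have hk := findKB_eq mat k h (mat.length + 1) 0 (Nat.zero_le k) (by
    obtain ⟨h1, _, _, _, _⟩ := h
    omega)
  obtain ⟨h1, h2, h3, h4, h5⟩ := h
  simp only [debordare_alt]
  rw [hk, ← Nat.cast_sub (show k ≤ mat.length by omega), PySem.List.slice_natCast]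
  unfold T
  rw [show mat.length - k - k = mat.length - 2*k by omega]
  apply List.map_congr_left
  intro r hr
  obtain ⟨i, hi, hgi⟩ := List.mem_iff_getElem.1 hr
  have hlen : i < mat.length - 2*k := by
    rw [List.length_take, List.length_drop] at hi
    omega
  have hrD : mat.getD (k+i) [] = r := by
    have hx := List.getElem?_eq_getElem hi
    rw [hgi, List.getElem?_take_of_lt (by omega), List.getElem?_drop] at hx
    rw [List.getD_eq_getElem?_getD, hx]
    rfl
  have hkr : k ≤ r.length := by
    rcases Nat.eq_zero_or_pos k with rfl | hkp
    · omega
    · rcases Nat.eq_zero_or_pos i with rfl | hip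
      · rw [Nat.add_zero] at hrD
        rw [hrD] at h2
        omega
      · have h5' := h5 (k-1) (by omega) (k+i) (by omega) (by omega) (by omega)
        rw [hrD] at h5'
        omega
  rw [← Nat.cast_sub hkr, PySem.List.slice_natCast]
  congr 1
  omega

-- ===== VERDICT (by name: the statement is the Claim_ definition above) =====
theorem debordare_spec : Claim_equal_debordare := by
  intro mat _ hpre
  obtain ⟨k, _, hk⟩ := hpre
  unfold Spec_debordare
  rw [altB_eq mat k hk, show debordare mat = debordareGo (mat.length+1) mat from rfl,
      goA_eq k mat (mat.length+1) hk (by omega)]
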